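-- pv_equiv track=rewrite | github.com/wm370857724/qft | vm_files/txt_to_bmp.py | text_to_quaternary
-- ===== SOURCE A (Python) =====
-- def text_to_quaternary(text: str) -> str:
--     """将文本转换为四进制字符串"""
--     # 将文本转换为字节
--     text_bytes = text.encode('utf-8')
--
--     # 转换为二进制字符串
--     binary_str = ''.join(format(byte, '08b') for byte in text_bytes)
--
--     # 转换为四进制
--     quaternary_str = ''
--     for i in range(0, len(binary_str), 2):
--         if i + 1 < len(binary_str):
--             quaternary_str += str(int(binary_str[i:i+2], 2))
--         else:
--             quaternary_str += str(int(binary_str[i] + '0', 2))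
--
--     return quaternary_str
-- ===== SOURCE B (Python) =====
-- def text_to_quaternary(text: str) -> str:
--     """将文本转换为四进制字符串"""
--     return ''.join(
--         f"{(b >> 6) & 3}{(b >> 4) & 3}{(b >> 2) & 3}{b & 3}"
--         for b in text.encode('utf-8')
--     )
-- ===== Notes on version B (the rewrite author's own statement) =====
-- stated objective: simpler
-- what changed: B drops A's intermediate 8-bit binary string and its two-bit index/slice loop: it iterates once over the encoded bytes and extracts each byte's four base-4 digits arithmetically with shifts and masks.
import Mathlib
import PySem

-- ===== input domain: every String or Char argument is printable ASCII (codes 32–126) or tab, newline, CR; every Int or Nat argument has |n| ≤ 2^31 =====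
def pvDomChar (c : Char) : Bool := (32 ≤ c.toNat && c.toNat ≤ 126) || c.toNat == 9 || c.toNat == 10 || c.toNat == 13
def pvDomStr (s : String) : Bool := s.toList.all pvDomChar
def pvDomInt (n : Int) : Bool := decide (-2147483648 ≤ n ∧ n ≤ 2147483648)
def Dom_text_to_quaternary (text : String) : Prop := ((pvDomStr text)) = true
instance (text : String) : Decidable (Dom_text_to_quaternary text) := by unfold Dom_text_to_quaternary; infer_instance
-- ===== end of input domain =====

-- B replaces A's intermediate 8-bit binary string and its two-bit index/slice loop by one pass
-- over the encoded bytes, extracting each byte's four base-4 digits with shifts and masks (objective: simpler).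

-- ===== PORT A =====
-- format(byte, '08b'): eight binary digits, MSB first (exact for byte < 256, the range of encode's bytes)
def pvBin8 (b : Nat) : List Char :=
  (List.range 8).map (fun i => if (b >>> (7 - i)) % 2 = 1 then '1' else '0')

-- the body of A's for-loop; the '.getD 0' is unreachable: int(_, 2) never raises since
-- binary_str holds only '0'/'1' characters
def pvStepA (bin : List Char) (i : Int) : List Char :=
  if i + 1 < (bin.length : Int) then
    PySem.Int.toChars ((PySem.Int.ofCharsBase? (PySem.List.slice bin (some i) (some (i + 2))) 2).getD 0)
  else
    PySem.Int.toChars ((PySem.Int.ofCharsBase? [PySem.List.pyGetD bin i ' ', '0'] 2).getD 0)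

def text_to_quaternary (text : String) : String :=
  -- text.encode('utf-8'): one byte per character, exact on the ASCII domain Dom_
  let bytes : List Nat := text.toList.map Char.toNat
  let binary : List Char := bytes.flatMap pvBin8
  String.ofList ((PySem.List.pyRange 0 (binary.length : Int) 2).foldl (fun acc i => acc ++ pvStepA binary i) [])

-- ===== PORT B =====
-- the four f-string digits of one byte: (b>>6)&3, (b>>4)&3, (b>>2)&3, b&3, each via str()
def pvQuad (b : Int) : List Char :=
  PySem.Int.toChars (PySem.Int.band (b >>> (6:Nat)) 3) ++
  PySem.Int.toChars (PySem.Int.band (b >>> (4:Nat)) 3) ++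
  PySem.Int.toChars (PySem.Int.band (b >>> (2:Nat)) 3) ++
  PySem.Int.toChars (PySem.Int.band b 3)

def text_to_quaternary_alt (text : String) : String :=
  -- ''.join(... for b in text.encode('utf-8')); encode is one byte per character on Dom_
  String.ofList ((text.toList.map Char.toNat).flatMap (fun b => pvQuad (b : Int)))

-- ===== PRECONDITION & SPEC =====
def Spec_text_to_quaternary (text : String) (out : String) : Prop := out = text_to_quaternary_alt text
instance (text : String) (out : String) : Decidable (Spec_text_to_quaternary text out) := by unfold Spec_text_to_quaternary; infer_instance

-- ===== CLAIM (what is proved, stated in full; the proofs are below) =====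
def Claim_equal_text_to_quaternary : Prop := ∀ (text : String), Dom_text_to_quaternary text → Spec_text_to_quaternary text (text_to_quaternary text)

-- ===== LEMMAS AND PROOFS =====

lemma pv_len_bin8 (b : Nat) : (pvBin8 b).length = 8 := by simp [pvBin8]

lemma pv_len_flat (bs : List Nat) : (bs.flatMap pvBin8).length = 8 * bs.length := by
  induction bs with
  | nil => simp
  | cons b t ih => simp [List.flatMap_cons, pv_len_bin8, ih]; ring

-- range(0, 2*m, 2) is [0, 2, …, 2*(m-1)]
lemma pv_range2 (m : Nat) :
    PySem.List.pyRange 0 (2 * (m : Int)) 2 = (List.range m).map (fun k => ((2 * k : Nat) : Int)) := by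
  rw [PySem.List.pyRange_of_pos _ _ (by norm_num)]
  rcases Nat.eq_zero_or_pos m with h | h
  · subst h; simp
  · have hlt : (0 : Int) < 2 * (m : Int) := by positivity
    rw [if_pos hlt]
    have : ((2 * (m : Int) - 0 + 2 - 1) / 2).toNat = m := by omega
    rw [this]
    exact List.map_congr_left (fun k _ => by push_cast; ring)

-- the first four loop steps on pvBin8 b ++ rest read only pvBin8 b
lemma pv_step_head (b : Nat) (rest : List Char) (k : Nat) (hk : k < 4) :
    pvStepA (pvBin8 b ++ rest) ((2 * k : Nat) : Int) =
      PySem.Int.toChars ((PySem.Int.ofCharsBase? (((pvBin8 b).drop (2 * k)).take 2) 2).getD 0) := by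
  have hlen : (pvBin8 b ++ rest).length = 8 + rest.length := by
    simp [pv_len_bin8]
  have hcond : ((2 * k : Nat) : Int) + 1 < ((pvBin8 b ++ rest).length : Int) := by
    rw [hlen]; push_cast; omega
  unfold pvStepA
  rw [if_pos hcond]
  have hslice : PySem.List.slice (pvBin8 b ++ rest) (some ((2 * k : Nat) : Int))
      (some (((2 * k : Nat) : Int) + 2)) = ((pvBin8 b).drop (2 * k)).take 2 := by
    have h2 : (((2 * k : Nat) : Int) + 2) = (((2 * k + 2 : Nat)) : Int) := by push_cast; ring
    rw [h2, PySem.List.slice_natCast]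
    have hd : (pvBin8 b ++ rest).drop (2 * k) = (pvBin8 b).drop (2 * k) ++ rest :=
      List.drop_append_of_le_length (by rw [pv_len_bin8]; omega)
    rw [hd]
    have ht : ((pvBin8 b).drop (2 * k)).length ≥ 2 := by
      rw [List.length_drop, pv_len_bin8]; omega
    rw [show 2 * k + 2 - 2 * k = 2 from by omega]
    exact List.take_append_of_le_length (by omega)
  rw [hslice]

-- one byte's four digits equal pvQuad (checked for every byte value the domain admits)
set_option maxRecDepth 8192 in
lemma pv_byte_quad : ∀ b : Nat, b < 128 →
    (List.range 4).flatMap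
        (fun k => PySem.Int.toChars ((PySem.Int.ofCharsBase? (((pvBin8 b).drop (2 * k)).take 2) 2).getD 0))
      = pvQuad (b : Int) := by decide

-- steps past the first byte ignore it
lemma pv_step_shift (b : Nat) (rest : List Char) (k : Nat) (hk : 2 * k + 1 < rest.length) :
    pvStepA (pvBin8 b ++ rest) ((2 * (4 + k) : Nat) : Int) = pvStepA rest ((2 * k : Nat) : Int) := by
  have hlen : (pvBin8 b ++ rest).length = 8 + rest.length := by simp [pv_len_bin8]
  have hc1 : ((2 * (4 + k) : Nat) : Int) + 1 < ((pvBin8 b ++ rest).length : Int) := by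
    rw [hlen]; push_cast; omega
  have hc2 : ((2 * k : Nat) : Int) + 1 < ((rest.length : Nat) : Int) := by push_cast; omega
  have h8 : (pvBin8 b).length = 8 := pv_len_bin8 b
  unfold pvStepA
  rw [if_pos hc1, if_pos hc2]
  have h2 : (((2 * (4 + k) : Nat) : Int) + 2) = (((2 * (4 + k) + 2 : Nat)) : Int) := by push_cast; ring
  have h3 : (((2 * k : Nat) : Int) + 2) = (((2 * k + 2 : Nat)) : Int) := by push_cast; ring
  rw [h2, h3, PySem.List.slice_natCast, PySem.List.slice_natCast,
      show 2 * (4 + k) + 2 - 2 * (4 + k) = 2 from by omega,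
      show 2 * k + 2 - 2 * k = 2 from by omega]
  have hd : (pvBin8 b ++ rest).drop (2 * (4 + k)) = rest.drop (2 * k) := by
    rw [List.drop_append,
        show 2 * (4 + k) - (pvBin8 b).length = 2 * k from by rw [h8]; omega,
        List.drop_eq_nil_of_le (by rw [h8]; omega), List.nil_append]
  rw [hd]

-- the whole loop over the concatenated binary string equals byte-by-byte quaternary digits
lemma pv_key (bs : List Nat) (h : ∀ b ∈ bs, b < 128) :
    (List.range (4 * bs.length)).flatMap
        (fun k => pvStepA (bs.flatMap pvBin8) ((2 * k : Nat) : Int))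
      = bs.flatMap (fun b => pvQuad (b : Int)) := by
  induction bs with
  | nil => simp
  | cons b t ih =>
    have hb : b < 128 := h b (by simp)
    have ht : ∀ x ∈ t, x < 128 := fun x hx => h x (by simp [hx])
    rw [List.flatMap_cons]
    rw [show 4 * (b :: t).length = 4 + 4 * t.length from by simp; ring, List.range_add,
        List.flatMap_append]
    congr 1
    · -- head: first four steps
      calc (List.range 4).flatMap
              (fun k => pvStepA (pvBin8 b ++ t.flatMap pvBin8) ((2 * k : Nat) : Int))
          = (List.range 4).flatMap
              (fun k => PySem.Int.toChars ((PySem.Int.ofCharsBase? (((pvBin8 b).drop (2 * k)).take 2) 2).getD 0)) := by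
            apply List.flatMap_congr
            intro k hk
            exact pv_step_head b _ k (by simpa using List.mem_range.mp hk)
        _ = pvQuad (b : Int) := pv_byte_quad b hb
    · -- tail: remaining steps shift onto t's binary string
      rw [List.flatMap_map]
      calc (List.range (4 * t.length)).flatMap
              (fun k => pvStepA (pvBin8 b ++ t.flatMap pvBin8) ((2 * (4 + k) : Nat) : Int))
          = (List.range (4 * t.length)).flatMap
              (fun k => pvStepA (t.flatMap pvBin8) ((2 * k : Nat) : Int)) := by
            apply List.flatMap_congr
            intro k hk
            have hk' : k < 4 * t.length := List.mem_range.mp hk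
            exact pv_step_shift b _ k (by rw [pv_len_flat]; omega)
        _ = t.flatMap (fun b => pvQuad (b : Int)) := ih ht

-- ===== VERDICT (by name: the statement is the Claim_ definition above) =====
theorem text_to_quaternary_spec : Claim_equal_text_to_quaternary := by
  intro text hdom
  unfold Spec_text_to_quaternary
  simp only [text_to_quaternary, text_to_quaternary_alt]
  apply congrArg String.ofList
  set bs : List Nat := text.toList.map Char.toNat with hbs
  have hlt : ∀ b ∈ bs, b < 128 := by
    intro b hb
    rw [hbs] at hb
    obtain ⟨c, hc, rfl⟩ := List.mem_map.mp hb
    have := List.all_eq_true.mp hdom c hc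
    simp [pvDomChar] at this
    omega
  have hlen : (((bs.flatMap pvBin8).length : Int)) = 2 * ((4 * bs.length : Nat) : Int) := by
    rw [pv_len_flat]; push_cast; ring
  rw [hlen, pv_range2, List.foldl_map, PySem.List.foldl_append_eq_flatMap
      (g := fun k => pvStepA (bs.flatMap pvBin8) ((2 * k : Nat) : Int))]
  simpa using pv_key bs hlt
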